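-- pv_equiv track=rewrite | github.com/gabekao/Diacritical-Characters | src/diacritical_characters/corpus.py | _disallowed_mask
-- ===== SOURCE A (Python) =====
-- from typing import Callable, Iterable, Iterator
--
-- def _disallowed_mask(allowed_letters: Iterable[str]) -> int:
--     allowed = {char.lower() for char in allowed_letters if len(char) == 1 and "a" <= char.lower() <= "z"}
--     disallowed_mask = 0
--     for index in range(26):
--         char = chr(ord("a") + index)
--         if char not in allowed:
--             disallowed_mask |= 1 << index
--     return disallowed_mask
-- ===== SOURCE B (Python) =====
-- def _disallowed_mask(allowed_letters):
--     # Complement approach: start with all 26 bits set (everything disallowed)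
--     # and clear the bit of each allowed letter in a single pass over the input.
--     mask = (1 << 26) - 1
--     for char in allowed_letters:
--         if len(char) == 1:
--             c = char.lower()
--             if "a" <= c <= "z":
--                 mask &= ~(1 << (ord(c) - ord("a")))
--     return mask
-- ===== Notes on version B (the rewrite author's own statement) =====
-- stated objective: simpler
-- what changed: Replaces the intermediate allowed-set plus a fixed scan over all 26 letter positions by a single pass over the input that starts from the all-ones mask and clears each allowed letter's bit directly.
import Mathlib
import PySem

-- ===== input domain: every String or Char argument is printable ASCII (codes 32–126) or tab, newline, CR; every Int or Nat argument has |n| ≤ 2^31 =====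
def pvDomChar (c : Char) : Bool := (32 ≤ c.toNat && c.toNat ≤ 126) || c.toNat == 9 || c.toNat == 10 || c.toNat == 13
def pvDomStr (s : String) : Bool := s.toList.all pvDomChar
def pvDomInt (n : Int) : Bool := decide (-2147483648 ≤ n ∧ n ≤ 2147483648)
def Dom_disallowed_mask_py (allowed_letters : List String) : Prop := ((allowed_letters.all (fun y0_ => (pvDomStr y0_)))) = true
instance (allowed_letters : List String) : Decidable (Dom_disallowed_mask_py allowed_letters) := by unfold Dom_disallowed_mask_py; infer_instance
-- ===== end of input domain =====

-- B replaces A's intermediate allowed-set plus fixed scan of the 26 letter positions by a single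
-- pass over the input that clears each allowed letter's bit out of the all-ones mask (simpler).

-- ===== PORT A =====
def disallowed_mask_py (allowed_letters : List String) : Int :=
  -- allowed = {char.lower() for char in allowed_letters if len(char) == 1 and "a" <= char.lower() <= "z"}
  let allowed : PySem.Set String :=
    PySem.Set.ofList ((allowed_letters.filter (fun char =>
      PySem.Str.len char == 1 && decide ("a" ≤ PySem.Str.lower char ∧ PySem.Str.lower char ≤ "z"))).map
      (fun char => PySem.Str.lower char))
  -- for index in range(26): char = chr(ord("a") + index); if char not in allowed: mask |= 1 << index
  (PySem.List.pyRange 0 26 1).foldl (fun mask index =>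
    if !(PySem.Set.contains allowed (String.ofList [Char.ofNat (97 + index).toNat])) then
      PySem.Int.bor mask ((1 : Int) <<< index.toNat)
    else mask) 0

-- ===== PORT B =====
def disallowed_mask_py_alt (allowed_letters : List String) : Int :=
  allowed_letters.foldl (fun mask char =>
    if PySem.Str.len char == 1 then
      let c := PySem.Str.lower char
      if "a" ≤ c ∧ c ≤ "z" then
        -- ord(c) - ord("a"): hand-ported, exact because c has length 1 on this branch
        PySem.Int.band mask (Int.not ((1 : Int) <<< ((c.toList.headD 'a').toNat - 97)))
      else mask
    else mask)
    (((1 : Int) <<< 26) - 1)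

-- ===== PRECONDITION & SPEC =====
def Spec_disallowed_mask_py (allowed_letters : List String) (out : Int) : Prop := out = disallowed_mask_py_alt allowed_letters
instance (allowed_letters : List String) (out : Int) : Decidable (Spec_disallowed_mask_py allowed_letters out) := by unfold Spec_disallowed_mask_py; infer_instance

-- ===== CLAIM (what is proved, stated in full; the proofs are below) =====
def Claim_equal_disallowed_mask_py : Prop := ∀ (allowed_letters : List String), Dom_disallowed_mask_py allowed_letters → Spec_disallowed_mask_py allowed_letters (disallowed_mask_py allowed_letters)

-- ===== LEMMAS AND PROOFS =====

-- the guard both Pythons apply to an input string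
def pvGuard (char : String) : Bool :=
  PySem.Str.len char == 1 && decide ("a" ≤ PySem.Str.lower char ∧ PySem.Str.lower char ≤ "z")

-- the letter index (ord(lower char) - ord('a')) of a guarded string
def pvIdx (char : String) : Nat := ((PySem.Str.lower char).toList.headD 'a').toNat - 97

-- whether letter i occurs (guarded, lowered) in the list
def pvSeen (l : List String) (i : Nat) : Bool := l.any (fun ch => pvGuard ch && decide (pvIdx ch = i))

-- bitmask with exactly the bits i < n such that f i
def pvMask (f : Nat → Bool) (n : Nat) : Nat := ∑ i ∈ Finset.range n, if f i then 2 ^ i else 0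

theorem pvMask_succ (f : Nat → Bool) (n : Nat) :
    pvMask f (n + 1) = pvMask f n + if f n then 2 ^ n else 0 := by
  simp [pvMask, Finset.sum_range_succ]

theorem pvMask_lt (f : Nat → Bool) (n : Nat) : pvMask f n < 2 ^ n := by
  induction n with
  | zero => simp [pvMask]
  | succ n ih =>
    rw [pvMask_succ, pow_succ]
    split <;> omega

theorem pvMask_congr (f g : Nat → Bool) (n : Nat) (h : ∀ i < n, f i = g i) :
    pvMask f n = pvMask g n := by
  unfold pvMask
  refine Finset.sum_congr rfl ?_
  intro i hi
  rw [h i (Finset.mem_range.mp hi)]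

theorem pvMask_testBit (f : Nat → Bool) (n j : Nat) :
    (pvMask f n).testBit j = (decide (j < n) && f j) := by
  induction n with
  | zero => simp [pvMask]
  | succ n ih =>
    rw [pvMask_succ]
    by_cases hf : f n = true
    · rw [hf, if_pos rfl, Nat.add_comm]
      rcases lt_trichotomy j n with h | rfl | h
      · rw [Nat.testBit_two_pow_add_gt h, ih]
        have : (j < n) = (j < n + 1) := by by_cases h2 : j < n + 1 <;> simp [h2] <;> omega
        simp [Nat.lt_of_lt_of_le h (Nat.le_succ n), h]
      · rw [Nat.testBit_two_pow_add_eq,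
          Nat.testBit_lt_two_pow (pvMask_lt f j)]
        simp [hf]
      · have hlt : 2 ^ n + pvMask f n < 2 ^ j := by
          have h1 := pvMask_lt f n
          have h2 : 2 ^ (n + 1) ≤ 2 ^ j := Nat.pow_le_pow_right (by omega) (by omega)
          rw [pow_succ] at h2; omega
        rw [Nat.testBit_lt_two_pow hlt]
        have : ¬ j < n + 1 := by omega
        simp [this]
    · rw [Bool.not_eq_true] at hf
      rw [hf]
      rw [if_neg (by exact Bool.false_ne_true), Nat.add_zero, ih]
      by_cases hj : j = n
      · subst hj; simp [hf]
      · by_cases hj2 : j < n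
        · simp [hj2, Nat.lt_succ_of_lt hj2]
        · have : ¬ j < n + 1 := by omega
          simp [hj2, this]

theorem pv_lor_two_pow (a n : Nat) (h : a < 2 ^ n) : a ||| 2 ^ n = a + 2 ^ n := by
  apply Nat.eq_of_testBit_eq
  intro i
  rw [Nat.testBit_lor, Nat.testBit_two_pow, Nat.add_comm]
  rcases lt_trichotomy i n with h' | rfl | h'
  · rw [Nat.testBit_two_pow_add_gt h']
    simp; omega
  · rw [Nat.testBit_two_pow_add_eq, Nat.testBit_lt_two_pow h]
    simp
  · have h2 : 2 ^ n + a < 2 ^ i := by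
      have : 2 ^ (n + 1) ≤ 2 ^ i := Nat.pow_le_pow_right (by omega) (by omega)
      rw [pow_succ] at this; omega
    rw [Nat.testBit_lt_two_pow h2,
      Nat.testBit_lt_two_pow (Nat.lt_trans h (by omega))]
    have : n ≠ i := by omega
    simp [this]

theorem pvMask_clear (f : Nat → Bool) (n k : Nat) (hk : k < n) :
    pvMask f n - (pvMask f n &&& 2 ^ k) = pvMask (fun i => f i && !decide (i = k)) n := by
  rw [Nat.and_two_pow, pvMask_testBit]
  have hmem : k ∈ Finset.range n := Finset.mem_range.mpr hk
  have hsplit := Finset.sum_eq_sum_diff_singleton_add hmem (fun i => if f i then 2 ^ i else 0)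
  have hsplit2 := Finset.sum_eq_sum_diff_singleton_add hmem
    (fun i => if (f i && !decide (i = k)) then 2 ^ i else 0)
  have hcongr : ∑ i ∈ Finset.range n \ {k}, (if f i then 2 ^ i else 0)
      = ∑ i ∈ Finset.range n \ {k}, (if (f i && !decide (i = k)) then 2 ^ i else 0) := by
    refine Finset.sum_congr rfl ?_
    intro i hi
    have : i ≠ k := by
      rcases Finset.mem_sdiff.mp hi with ⟨-, h2⟩
      simpa using h2
    simp [this]
  unfold pvMask
  rw [hsplit, hsplit2, hcongr]
  by_cases hfk : f k = true <;> simp [hfk, hk]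

theorem pv_band_not_natCast (m n : Nat) :
    PySem.Int.band (↑m) (Int.not ↑n) = ↑(m - (m &&& n)) := by
  have h1 : Int.not ↑n = Int.negSucc n := rfl
  rw [h1]
  simp [PySem.Int.band]

theorem pv_one_shiftLeft (k : Nat) : ((1 : Int) <<< ((k : Nat) : Int)) = ((2 ^ k : Nat) : Int) := by
  rw [Int.one_shiftLeft]

theorem pv_one_shiftLeft_nat (k : Nat) : ((1 : Int) <<< k) = ((2 ^ k : Nat) : Int) := by
  rw [Int.shiftLeft_eq]
  push_cast
  ring

theorem pv_singleton_le (c d : Char) :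
    (String.ofList [c] ≤ String.ofList [d]) ↔ c.toNat ≤ d.toNat := by
  rw [← not_lt, String.lt_iff_toList_lt]
  rw [show ((String.ofList [c]).toList = [c]) from String.toList_ofList ..]
  rw [show ((String.ofList [d]).toList = [d]) from String.toList_ofList ..]
  rw [List.cons_lt_cons_iff]
  have h1 : (d.val < c.val) ↔ d.toNat < c.toNat := UInt32.lt_iff_toNat_lt
  have h2 : (d.val = c.val) ↔ d.toNat = c.toNat := by rw [← UInt32.toNat_inj]; rfl
  simp only [Char.lt_def, Char.ext_iff, not_or, h1, h2, List.lt_irrefl, and_false,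
    not_false_iff, and_true]
  omega

-- a guarded string lowers to a single letter character
theorem pvGuard_spec (ch : String) (h : pvGuard ch = true) :
    ∃ c : Char, (PySem.Str.lower ch).toList = [c] ∧ 97 ≤ c.toNat ∧ c.toNat ≤ 122 ∧
      pvIdx ch = c.toNat - 97 := by
  unfold pvGuard at h
  rw [Bool.and_eq_true] at h
  obtain ⟨hlen, hord⟩ := h
  have hlen1 : ch.toList.length = 1 := by
    rw [beq_iff_eq, PySem.Str.len] at hlen
    exact_mod_cast hlen
  have hlow : (PySem.Str.lower ch).toList = PySem.Chars.lower ch.toList :=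
    PySem.Str.toList_lower ch
  have hlen2 : (PySem.Str.lower ch).toList.length = 1 := by
    rw [hlow, PySem.Chars.lower, List.length_map, hlen1]
  obtain ⟨c, hc⟩ := List.length_eq_one_iff.mp hlen2
  refine ⟨c, hc, ?_, ?_, ?_⟩
  · have heq : PySem.Str.lower ch = String.ofList [c] := by
      apply String.toList_inj.mp
      rw [hc, String.toList_ofList]
    rw [decide_eq_true_iff] at hord
    have h1 := hord.1
    rw [heq, show ("a" : String) = String.ofList ['a'] from by decide] at h1
    have := (pv_singleton_le 'a' c).mp h1
    simpa using this
  · have heq : PySem.Str.lower ch = String.ofList [c] := by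
      apply String.toList_inj.mp
      rw [hc, String.toList_ofList]
    rw [decide_eq_true_iff] at hord
    have h2 := hord.2
    rw [heq, show ("z" : String) = String.ofList ['z'] from by decide] at h2
    have := (pv_singleton_le c 'z').mp h2
    simpa using this
  · rw [pvIdx, hc]
    rfl

theorem pvIdx_lt (ch : String) (h : pvGuard ch = true) : pvIdx ch < 26 := by
  obtain ⟨c, -, h1, h2, h3⟩ := pvGuard_spec ch h
  omega

theorem pv_chr_toNat (i : Nat) (h : i < 26) : (Char.ofNat (97 + i)).toNat = 97 + i := by
  rw [Char.toNat_ofNat, if_pos (Or.inl (by omega))]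

-- A's loop over range(26) builds the mask of letters missing from the set s
theorem pvA_loop (s : PySem.Set String) (n : Nat) :
    (PySem.List.pyRange 0 (n : Int) 1).foldl (fun mask index =>
      if !(PySem.Set.contains s (String.ofList [Char.ofNat (97 + index).toNat])) then
        PySem.Int.bor mask ((1 : Int) <<< index.toNat)
      else mask) 0
    = ↑(pvMask (fun i => !(PySem.Set.contains s (String.ofList [Char.ofNat (97 + i)]))) n) := by
  induction n with
  | zero =>
    rw [show ((0:Nat):Int) = 0 from rfl, PySem.List.pyRange_one_eq_nil (le_refl 0)]
    simp [pvMask]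
  | succ n ih =>
    rw [show (((n+1:Nat)):Int) = (n:Int) + 1 from by push_cast; ring,
      PySem.List.pyRange_one_succ_right (by positivity), List.foldl_append]
    rw [ih]
    simp only [List.foldl_cons, List.foldl_nil]
    have hc : ((97:Int) + (n:Int)).toNat = 97 + n := by omega
    have ht : ((n:Int)).toNat = n := Int.toNat_natCast n
    rw [hc, ht, pvMask_succ]
    by_cases hs : PySem.Set.contains s (String.ofList [Char.ofNat (97 + n)]) = true
    · rw [hs]
      simp
    · rw [Bool.not_eq_true] at hs
      rw [hs]
      simp only [Bool.not_false]
      rw [pv_one_shiftLeft, PySem.Int.bor_natCast, pv_lor_two_pow _ n (pvMask_lt _ n)]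
      push_cast
      ring

-- B's loop clears out of an arbitrary 26-bit mask the bits of the guarded letters it meets
theorem pvB_loop (l : List String) (f : Nat → Bool) :
    l.foldl (fun mask char =>
      if PySem.Str.len char == 1 then
        let c := PySem.Str.lower char
        if "a" ≤ c ∧ c ≤ "z" then
          PySem.Int.band mask (Int.not ((1 : Int) <<< ((c.toList.headD 'a').toNat - 97)))
        else mask
      else mask) ↑(pvMask f 26)
    = ↑(pvMask (fun i => f i && !pvSeen l i) 26) := by
  induction l generalizing f with
  | nil =>
    simp only [List.foldl_nil]
    exact congrArg _ (pvMask_congr _ _ 26 (fun i _ => by simp [pvSeen]))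
  | cons ch l ih =>
    rw [List.foldl_cons]
    by_cases hg : pvGuard ch = true
    · have hsplit := hg
      unfold pvGuard at hsplit
      rw [Bool.and_eq_true] at hsplit
      obtain ⟨hlen, hord⟩ := hsplit
      obtain ⟨c, hc, h97, h122, hidx⟩ := pvGuard_spec ch hg
      have hk26 : pvIdx ch < 26 := pvIdx_lt ch hg
      rw [if_pos hlen]
      simp only []
      rw [if_pos (of_decide_eq_true hord)]
      have hhead : ((PySem.Str.lower ch).toList.headD 'a') = c := by rw [hc]; rfl
      have hkey : ((PySem.Str.lower ch).toList.headD 'a').toNat - 97 = pvIdx ch := by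
        rw [hhead, hidx]
      rw [hkey, pv_one_shiftLeft_nat, pv_band_not_natCast, pvMask_clear f 26 (pvIdx ch) hk26, ih]
      refine congrArg _ (pvMask_congr _ _ 26 (fun i _ => ?_))
      have hany : pvSeen (ch :: l) i = (decide (pvIdx ch = i) || pvSeen l i) := by
        unfold pvSeen
        rw [List.any_cons, hg, Bool.true_and]
      rw [hany]
      by_cases hik : i = pvIdx ch
      · subst hik; simp
      · have : ¬ (pvIdx ch = i) := fun h => hik h.symm
        simp [hik, this]
    · have hstep : (if PySem.Str.len ch == 1 then
          (if "a" ≤ PySem.Str.lower ch ∧ PySem.Str.lower ch ≤ "z" then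
            PySem.Int.band (↑(pvMask f 26) : Int)
              (Int.not ((1 : Int) <<< (((PySem.Str.lower ch).toList.headD 'a').toNat - 97)))
          else ↑(pvMask f 26))
        else (↑(pvMask f 26) : Int)) = ↑(pvMask f 26) := by
        by_cases hlen : (PySem.Str.len ch == 1) = true
        · rw [if_pos hlen]
          have hord : ¬ ("a" ≤ PySem.Str.lower ch ∧ PySem.Str.lower ch ≤ "z") := by
            intro hcon
            exact hg (by unfold pvGuard; rw [hlen, decide_eq_true hcon]; rfl)
          rw [if_neg hord]
        · rw [if_neg hlen]
      rw [hstep, ih]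
      refine congrArg _ (pvMask_congr _ _ 26 (fun i _ => ?_))
      have hgf : pvGuard ch = false := by
        revert hg; cases pvGuard ch <;> simp
      have : pvSeen (ch :: l) i = pvSeen l i := by
        unfold pvSeen
        rw [List.any_cons, hgf, Bool.false_and, Bool.false_or]
      rw [this]

-- the all-ones starting mask of B
theorem pv_init : (((1 : Int) <<< 26) - 1) = ↑(pvMask (fun _ => true) 26) := by
  rw [show pvMask (fun _ => true) 26 = 67108863 from by decide]
  decide

-- membership of chr(97+i) in A's allowed set coincides with pvSeen
theorem pvA_eq_seen (L : List String) (i : Nat) (hi : i < 26) :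
    PySem.Set.contains (PySem.Set.ofList ((L.filter (fun char =>
        PySem.Str.len char == 1 && decide ("a" ≤ PySem.Str.lower char ∧ PySem.Str.lower char ≤ "z"))).map
        (fun char => PySem.Str.lower char))) (String.ofList [Char.ofNat (97 + i)])
      = pvSeen L i := by
  rw [Bool.eq_iff_iff, PySem.Set.contains_iff, PySem.Set.mem_ofList, List.mem_map]
  constructor
  · rintro ⟨ch, hmem, heq⟩
    rw [List.mem_filter] at hmem
    obtain ⟨hmem, hgd⟩ := hmem
    have hg : pvGuard ch = true := hgd
    obtain ⟨c, hc, h97, h122, hidx⟩ := pvGuard_spec ch hg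
    have hceq : c = Char.ofNat (97 + i) := by
      have := congrArg String.toList heq
      rwa [hc, String.toList_ofList, List.cons.injEq, eq_self_iff_true, and_true] at this
    have hcn : c.toNat = 97 + i := by rw [hceq, pv_chr_toNat i hi]
    rw [pvSeen, List.any_eq_true]
    exact ⟨ch, hmem, by rw [hg, Bool.true_and, decide_eq_true_iff, hidx]; omega⟩
  · intro hseen
    rw [pvSeen, List.any_eq_true] at hseen
    obtain ⟨ch, hmem, hcond⟩ := hseen
    rw [Bool.and_eq_true] at hcond
    obtain ⟨hg, hidxi⟩ := hcond
    obtain ⟨c, hc, h97, h122, hidx⟩ := pvGuard_spec ch hg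
    refine ⟨ch, List.mem_filter.mpr ⟨hmem, hg⟩, ?_⟩
    have hcn : c.toNat = 97 + i := by
      rw [decide_eq_true_iff] at hidxi
      rw [hidx] at hidxi
      omega
    have hceq : c = Char.ofNat (97 + i) := by
      rw [← hcn, Char.ofNat_toNat]
    apply String.toList_inj.mp
    rw [hc, String.toList_ofList, hceq]

-- ===== VERDICT (by name: the statement is the Claim_ definition above) =====
theorem disallowed_mask_py_spec : Claim_equal_disallowed_mask_py := by
  intro L _hdom
  show disallowed_mask_py L = disallowed_mask_py_alt L
  unfold disallowed_mask_py disallowed_mask_py_alt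
  rw [pv_init, pvB_loop]
  rw [show (26 : Int) = ((26 : Nat) : Int) from rfl, pvA_loop]
  refine congrArg _ (pvMask_congr _ _ 26 (fun i hi => ?_))
  rw [pvA_eq_seen L i hi, Bool.true_and]
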